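-- pv_equiv track=rewrite | github.com/Shivam-baghel/Python_Scaler | 2.Data_Structures_and_Algorithm/2.Advance/01.Arrays_1/Assignment/Q3.Continous_Sum_Query.py | contSumQuery
-- ===== SOURCE A (Python) =====
-- def contSumQuery(A, B):
--     #this is same 2nd question done in array-1 in advanced class.
--     # here queries are given in 1 based indexing. we have to convert queries to 0 based indexing.
--
--     #create empty array containing 0 of size A
--     resArray = [0]*A
--
--     #loop over 2D array B. To find i and j for value x and modify resArray
--     lengthOfB = len(B)
--     for l in range(lengthOfB):
--         i = B[l][0]
--         j = B[l][1]
--         x = B[l][2]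
--
--         resArray[i-1] += x
--         if j < A:
--             resArray[j] -= x
--
--     # perform prefix Sum on modified resArray
--     for i in range(1,A):
--         resArray[i] = resArray[i-1] + resArray[i]
--
--     # return the resArray
--     return resArray
-- ===== SOURCE B (Python) =====
-- def contSumQuery(A, B):
--     res = [0] * A
--     for q in B:
--         i, j, x = q[0], q[1], q[2]
--         res[i - 1:] = [v + x for v in res[i - 1:]]
--         res[j:] = [v - x for v in res[j:]]
--     return res
-- ===== Notes on version B (the rewrite author's own statement) =====
-- stated objective: simpler
-- what changed: Replaces the difference-array endpoint marking plus a separate in-place prefix-sum pass by applying each query eagerly as two slice-based suffix updates (add x to res[i-1:], subtract x from res[j:]), so no second pass and no endpoint bookkeeping remain.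
import Mathlib
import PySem

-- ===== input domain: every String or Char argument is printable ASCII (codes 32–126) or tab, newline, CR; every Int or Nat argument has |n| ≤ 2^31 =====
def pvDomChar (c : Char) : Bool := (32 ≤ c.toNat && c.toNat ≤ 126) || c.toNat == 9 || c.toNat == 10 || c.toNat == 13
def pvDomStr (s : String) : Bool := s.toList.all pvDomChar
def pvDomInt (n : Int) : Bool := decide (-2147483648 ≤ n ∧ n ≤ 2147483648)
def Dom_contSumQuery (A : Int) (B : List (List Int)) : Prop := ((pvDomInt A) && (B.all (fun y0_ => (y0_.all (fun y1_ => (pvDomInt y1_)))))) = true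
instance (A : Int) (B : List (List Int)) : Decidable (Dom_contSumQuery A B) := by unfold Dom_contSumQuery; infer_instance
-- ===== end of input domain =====

-- B replaces A's difference-array endpoint marking + prefix-sum pass by applying each
-- query eagerly as two slice-based suffix updates (add x from i-1 on, subtract from j on);
-- simpler (no second pass), not faster.


-- ===== PORT A =====
-- the body of A's query loop (resArray[i-1] += x; if j < A: resArray[j] -= x)
def csqStep (A : Int) (res : List Int) (q : List Int) : List Int :=
  let i := PySem.List.pyGetD q 0 0
  let j := PySem.List.pyGetD q 1 0
  let x := PySem.List.pyGetD q 2 0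
  let res' := PySem.List.pySetD res (i - 1) (PySem.List.pyGetD res (i - 1) 0 + x)
  if j < A then PySem.List.pySetD res' j (PySem.List.pyGetD res' j 0 - x) else res'

-- the body of A's prefix-sum loop (resArray[i] = resArray[i-1] + resArray[i])
def csqPrefStep (res : List Int) (i : Int) : List Int :=
  PySem.List.pySetD res i (PySem.List.pyGetD res (i - 1) 0 + PySem.List.pyGetD res i 0)

def contSumQuery (A : Int) (B : List (List Int)) : List Int :=
  let res0 := List.replicate A.toNat 0
  let res1 := B.foldl (csqStep A) res0
  (PySem.List.pyRange 1 A 1).foldl csqPrefStep res1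

-- ===== PORT B =====
-- res[e:] = L : full-suffix slice assignment (exact: Python clamps e with the slice rule,
-- which is PySem.List.clampIdx; there is no PySem primitive for slice assignment)
def sfxSet (res : List Int) (e : Int) (L : List Int) : List Int :=
  res.take (PySem.List.clampIdx res.length e) ++ L

-- B's query step: res[i-1:] = [v + x for v in res[i-1:]]; res[j:] = [v - x for v in res[j:]]
def altStep (res : List Int) (q : List Int) : List Int :=
  let i := PySem.List.pyGetD q 0 0
  let j := PySem.List.pyGetD q 1 0
  let x := PySem.List.pyGetD q 2 0
  let r1 := sfxSet res (i - 1) ((PySem.List.slice res (some (i - 1)) none).map (fun v => v + x))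
  sfxSet r1 j ((PySem.List.slice r1 (some j) none).map (fun v => v - x))

def contSumQuery_alt (A : Int) (B : List (List Int)) : List Int :=
  B.foldl altStep (List.replicate A.toNat 0)

-- ===== PRECONDITION & SPEC =====
-- Pre_: exactly the inputs on which Python A returns (no IndexError): every query row
-- has at least 3 entries, its start i satisfies 1-A ≤ i ≤ A (so resArray[i-1] is a
-- valid, possibly negative, Python index), and its end j, when j < A triggers the
-- subtraction, satisfies -A ≤ j.
def Pre_contSumQuery (A : Int) (B : List (List Int)) : Prop :=
  ∀ q ∈ B, 3 ≤ q.length ∧ 1 - A ≤ PySem.List.pyGetD q 0 0 ∧ PySem.List.pyGetD q 0 0 ≤ A ∧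
    (PySem.List.pyGetD q 1 0 < A → -A ≤ PySem.List.pyGetD q 1 0)
instance (A : Int) (B : List (List Int)) : Decidable (Pre_contSumQuery A B) := by unfold Pre_contSumQuery; infer_instance
def pvWitness_contSumQuery : Int × List (List Int) := (3, [[1, 2, 5]])

def Spec_contSumQuery (A : Int) (B : List (List Int)) (out : List Int) : Prop :=
  out = contSumQuery_alt A B
instance (A : Int) (B : List (List Int)) (out : List Int) : Decidable (Spec_contSumQuery A B out) := by unfold Spec_contSumQuery; infer_instance

-- ===== CLAIM (what is proved, stated in full; the proofs are below) =====
def Claim_equal_contSumQuery : Prop := ∀ (A : Int) (B : List (List Int)), Dom_contSumQuery A B → Pre_contSumQuery A B → Spec_contSumQuery A B (contSumQuery A B)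

-- ===== LEMMAS AND PROOFS =====

-- a query row that A accepts for output length A: 1-A ≤ i ≤ A, and -A ≤ j when j < A
def csqGood (A : Int) (q : List Int) : Prop :=
  1 - A ≤ PySem.List.pyGetD q 0 0 ∧ PySem.List.pyGetD q 0 0 ≤ A ∧
    (PySem.List.pyGetD q 1 0 < A → -A ≤ PySem.List.pyGetD q 1 0)

-- difference-array contribution of query q at position t (what A's query loop writes)
def csqD (A : Int) (q : List Int) (t : Int) : Int :=
  PySem.List.pyGetD q 2 0 *
    ((if PySem.Int.mod (PySem.List.pyGetD q 0 0 - 1) A = t then (1 : Int) else 0) -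
     (if PySem.List.pyGetD q 1 0 < A ∧ PySem.Int.mod (PySem.List.pyGetD q 1 0) A = t
      then (1 : Int) else 0))

-- suffix contribution of query q at position t (what B's two suffix updates add)
def csqE (A : Int) (q : List Int) (t : Int) : Int :=
  PySem.List.pyGetD q 2 0 *
    ((if PySem.Int.mod (PySem.List.pyGetD q 0 0 - 1) A ≤ t then (1 : Int) else 0) -
     (if PySem.List.pyGetD q 1 0 < A ∧ PySem.Int.mod (PySem.List.pyGetD q 1 0) A ≤ t
      then (1 : Int) else 0))

theorem length_csqStep (A : Int) (res q : List Int) :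
    (csqStep A res q).length = res.length := by
  simp only [csqStep]
  split <;> simp [PySem.List.length_pySetD]

theorem getD_set_int (res : List Int) (e : Int) (he0 : 0 ≤ e) (he1 : e < (res.length : Int))
    (v : Int) (t : Nat) :
    (res.set e.toNat v).getD t 0 = if e = (t : Int) then v else res.getD t 0 := by
  by_cases ht : t < res.length
  · rw [List.getD_eq_getElem _ _ (by simpa using ht), List.getD_eq_getElem _ _ ht,
      List.getElem_set]
    split_ifs with h1 h2 h2
    · rfl
    · omega
    · omega
    · rfl
  · rw [List.getD_eq_default _ _ (by simpa using (Nat.le_of_not_lt ht)),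
      List.getD_eq_default _ _ (Nat.le_of_not_lt ht)]
    rw [if_neg (by omega)]

-- Python resArray[e] = v at a valid (possibly negative) index e writes position e % len
theorem pyWrite_getD (res : List Int) (e v : Int) (he0 : -(res.length : Int) ≤ e)
    (he1 : e < (res.length : Int)) (t : Nat) :
    (PySem.List.pySetD res e v).getD t 0 =
      if PySem.Int.mod e (res.length : Int) = (t : Int) then v else res.getD t 0 := by
  have hL : 0 < res.length := by omega
  have hm : PySem.Int.mod e (res.length : Int) = if 0 ≤ e then e else e + res.length := by
    rw [PySem.Int.mod_eq_emod_of_pos (by omega)]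
    split_ifs with h
    · exact Int.emod_eq_of_lt h (by omega)
    · have h2 : (e + (res.length : Int) * 1) % (res.length : Int) = e % (res.length : Int) :=
        Int.add_mul_emod_self_left e (res.length : Int) 1
      rw [← h2, mul_one]
      exact Int.emod_eq_of_lt (by omega) (by omega)
  by_cases he : 0 ≤ e
  · rw [PySem.List.pySetD_of_nonneg _ _ he, getD_set_int res e he he1 v t, hm, if_pos he]
  · have hidx : res.length - (-e).toNat = (e + res.length).toNat := by omega
    have hset : PySem.List.pySetD res e v = res.set (e + res.length).toNat v := by
      simp only [PySem.List.pySetD, PySem.List.pySet?, PySem.List.pyIdx?,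
        if_neg he, if_pos he0, hidx, Option.map_some, Option.getD_some]
    rw [hset, getD_set_int res (e + res.length) (by omega) (by omega) v t, hm, if_neg he]

-- Python resArray[e] at a valid (possibly negative) index e reads position e % len
theorem pyRead_getD (res : List Int) (e : Int) (he0 : -(res.length : Int) ≤ e)
    (he1 : e < (res.length : Int)) :
    PySem.List.pyGetD res e 0 = res.getD (PySem.Int.mod e (res.length : Int)).toNat 0 := by
  have hL : 0 < res.length := by omega
  have hm : PySem.Int.mod e (res.length : Int) = if 0 ≤ e then e else e + res.length := by
    rw [PySem.Int.mod_eq_emod_of_pos (by omega)]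
    split_ifs with h
    · exact Int.emod_eq_of_lt h (by omega)
    · have h2 : (e + (res.length : Int) * 1) % (res.length : Int) = e % (res.length : Int) :=
        Int.add_mul_emod_self_left e (res.length : Int) 1
      rw [← h2, mul_one]
      exact Int.emod_eq_of_lt (by omega) (by omega)
  by_cases he : 0 ≤ e
  · rw [PySem.List.pyGetD_eq_getElem res 0 he he1, hm, if_pos he,
      List.getD_eq_getElem _ _ (by omega)]
  · rw [hm, if_neg he]
    have hidx : res.length - (-e).toNat = (e + res.length).toNat := by omega
    simp only [PySem.List.pyGetD, PySem.List.pyGet?, PySem.List.pyIdx?,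
      if_neg he, if_pos he0, hidx, Option.bind]
    rw [List.getD_eq_getElem?_getD]

-- resArray[e] += x at a valid (possibly negative) index e, read at position t
theorem pyAdd_getD (res : List Int) (e x : Int) (he0 : -(res.length : Int) ≤ e)
    (he1 : e < (res.length : Int)) (t : Nat) :
    (PySem.List.pySetD res e (PySem.List.pyGetD res e 0 + x)).getD t 0 =
      res.getD t 0 + if PySem.Int.mod e (res.length : Int) = (t : Int) then x else 0 := by
  have hmb : 0 ≤ PySem.Int.mod e (res.length : Int) ∧
      PySem.Int.mod e (res.length : Int) < (res.length : Int) := by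
    constructor
    · exact PySem.Int.mod_nonneg _ (by omega)
    · exact PySem.Int.mod_lt _ (by omega)
  rw [pyWrite_getD res e _ he0 he1 t, pyRead_getD res e he0 he1]
  split_ifs with h
  · rw [show (PySem.Int.mod e (res.length : Int)).toNat = t by omega]
  · ring

theorem length_pyAdd (res : List Int) (e x : Int) :
    (PySem.List.pySetD res e (PySem.List.pyGetD res e 0 + x)).length = res.length := by
  simp [PySem.List.length_pySetD]

theorem getD_csqStep (A : Int) (res q : List Int) (hA : (res.length : Int) = A)
    (hg : csqGood A q) (t : Nat) :
    (csqStep A res q).getD t 0 = res.getD t 0 + csqD A q t := by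
  obtain ⟨h1, h2, h3⟩ := hg
  simp only [csqStep, csqD]
  have hi0 : -(res.length : Int) ≤ PySem.List.pyGetD q 0 0 - 1 := by omega
  have hi1 : PySem.List.pyGetD q 0 0 - 1 < (res.length : Int) := by omega
  split
  · rename_i hj
    have hj' : -A ≤ PySem.List.pyGetD q 1 0 := h3 hj
    set r1 := PySem.List.pySetD res (PySem.List.pyGetD q 0 0 - 1)
        (PySem.List.pyGetD res (PySem.List.pyGetD q 0 0 - 1) 0 + PySem.List.pyGetD q 2 0)
      with hr1
    have hlen1 : r1.length = res.length := by rw [hr1]; exact length_pyAdd _ _ _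
    rw [sub_eq_add_neg (PySem.List.pyGetD r1 (PySem.List.pyGetD q 1 0) 0)
      (PySem.List.pyGetD q 2 0)]
    rw [pyAdd_getD r1 _ _ (by rw [hlen1]; omega) (by rw [hlen1]; omega) t]
    rw [hr1, pyAdd_getD res _ _ hi0 hi1 t]
    rw [show ((PySem.List.pySetD res (PySem.List.pyGetD q 0 0 - 1)
        (PySem.List.pyGetD res (PySem.List.pyGetD q 0 0 - 1) 0 +
          PySem.List.pyGetD q 2 0)).length : Int) = (res.length : Int) by
      rw [length_pyAdd]]
    simp only [hj, true_and, hA]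
    split_ifs <;> ring
  · rename_i hj
    rw [pyAdd_getD res _ _ hi0 hi1 t, hA]
    simp only [hj, false_and, if_false]
    split_ifs <;> ring

theorem fold1_length (A : Int) (B : List (List Int)) (res : List Int) :
    (B.foldl (csqStep A) res).length = res.length := by
  induction B generalizing res with
  | nil => rfl
  | cons q B ih => simp [List.foldl_cons, ih, length_csqStep]

theorem fold1_getD (A : Int) (B : List (List Int)) (res : List Int)
    (hA : (res.length : Int) = A) (hg : ∀ q ∈ B, csqGood A q) (t : Nat) :
    (B.foldl (csqStep A) res).getD t 0 =
      res.getD t 0 + (B.map (fun q => csqD A q t)).sum := by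
  induction B generalizing res with
  | nil => simp
  | cons q B ih =>
    have h1 := ih (csqStep A res q) (by rw [length_csqStep]; exact hA)
      (fun r hr => hg r (List.mem_cons_of_mem _ hr))
    simp only [List.foldl_cons] at *
    rw [h1, getD_csqStep A res q hA (hg q List.mem_cons_self) t]
    simp [add_assoc]

theorem length_csqPrefStep (res : List Int) (i : Int) :
    (csqPrefStep res i).length = res.length := by
  simp [csqPrefStep, PySem.List.length_pySetD]

theorem pfx_length (L : List Int) (res : List Int) :
    (L.foldl csqPrefStep res).length = res.length := by
  induction L generalizing res with
  | nil => rfl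
  | cons i L ih => simp [List.foldl_cons, ih, length_csqPrefStep]

theorem pfx_getD (res : List Int) :
    ∀ (b : Nat), b ≤ res.length → ∀ t : Nat, t < res.length →
      ((PySem.List.pyRange 1 (b : Int) 1).foldl csqPrefStep res).getD t 0 =
        if t < b then (res.take (t + 1)).sum else res.getD t 0 := by
  intro b
  induction b with
  | zero =>
    intro _ t ht
    rw [PySem.List.pyRange_one_eq_nil (by norm_num)]
    simp
  | succ b ih =>
    intro hb t ht
    by_cases hb0 : b = 0
    · subst hb0
      rw [show ((0 + 1 : Nat) : Int) = 1 by norm_num,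
        PySem.List.pyRange_one_eq_nil le_rfl]
      simp only [List.foldl_nil]
      split_ifs with h
      · have ht0 : t = 0 := by omega
        subst ht0
        rw [List.sum_take_succ _ 0 ht, List.getD_eq_getElem _ _ ht]
        simp
      · rfl
    · have hb1 : (1 : Int) ≤ (b : Int) := by omega
      rw [show ((b + 1 : Nat) : Int) = (b : Int) + 1 by push_cast; ring,
        PySem.List.pyRange_one_succ_right hb1, List.foldl_append]
      simp only [List.foldl_cons, List.foldl_nil]
      have hFlen : ((PySem.List.pyRange 1 (b : Int) 1).foldl csqPrefStep res).length
          = res.length := pfx_length _ _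
      set F := (PySem.List.pyRange 1 (b : Int) 1).foldl csqPrefStep res with hF
      unfold csqPrefStep
      have hv1 : PySem.List.pyGetD F ((b : Int) - 1) 0 = F.getD (b - 1) 0 := by
        rw [PySem.List.pyGetD_eq_getElem F 0 (by omega) (by rw [hFlen]; push_cast; omega),
          List.getD_eq_getElem _ _ (by rw [hFlen]; omega)]
        congr 1
        omega
      have hv2 : PySem.List.pyGetD F (b : Int) 0 = F.getD b 0 := by
        rw [PySem.List.pyGetD_eq_getElem F 0 (by omega) (by rw [hFlen]; push_cast; omega),
          List.getD_eq_getElem _ _ (by rw [hFlen]; omega)]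
        simp
      rw [PySem.List.pySetD_of_nonneg _ _ (by omega : (0 : Int) ≤ (b : Int)),
        getD_set_int F (b : Int) (by omega) (by rw [hFlen]; omega) _ t]
      rw [hv1, hv2, ih (by omega) (b - 1) (by omega), ih (by omega) b (by omega),
        if_pos (by omega : b - 1 < b), if_neg (by omega : ¬ b < b)]
      split_ifs with h1 h2 h2
      · have htb : t = b := by omega
        subst htb
        rw [show t - 1 + 1 = t by omega, List.sum_take_succ _ t ht,
          List.getD_eq_getElem _ _ ht]
      · omega
      · rw [ih (by omega) t ht, if_pos (by omega)]
      · rw [ih (by omega) t ht, if_neg (by omega)]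

theorem take_sum_range (L : List Int) :
    ∀ m, m ≤ L.length →
      (L.take m).sum = ((List.range m).map (fun s => L.getD s 0)).sum := by
  intro m
  induction m with
  | zero => simp
  | succ m ih =>
    intro hm
    rw [List.sum_take_succ _ m (by omega), List.range_succ, ih (by omega)]
    simp [List.getD_eq_getElem?_getD, List.getElem?_eq_getElem (by omega : m < L.length)]

-- prefix sums of the difference-array contributions are B's suffix contributions
theorem sum_map_DE (A : Int) (BQ : List (List Int)) (hg : ∀ q ∈ BQ, csqGood A q) :
    ∀ t : Nat, (t : Int) < A →
      ((List.range (t + 1)).map (fun s : Nat => (BQ.map (fun q => csqD A q (s : Int))).sum)).sum =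
        (BQ.map (fun q => csqE A q t)).sum := by
  intro t
  induction t with
  | zero =>
    intro ht
    simp only [List.range_succ, List.range_zero, List.nil_append, List.map_cons,
      List.map_nil, List.sum_cons, List.sum_nil, add_zero]
    congr 1
    apply List.map_congr_left
    intro q hq
    have hm1 : 0 ≤ PySem.Int.mod (PySem.List.pyGetD q 0 0 - 1) A :=
      PySem.Int.mod_nonneg _ (by omega)
    have hm2 : 0 ≤ PySem.Int.mod (PySem.List.pyGetD q 1 0) A :=
      PySem.Int.mod_nonneg _ (by omega)
    simp only [csqD, csqE, Nat.cast_zero]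
    split_ifs <;> first | omega | ring
  | succ t ih =>
    intro ht
    rw [List.range_succ, List.map_append, List.sum_append,
      ih (by push_cast at ht ⊢; omega)]
    simp only [List.map_cons, List.map_nil, List.sum_cons, List.sum_nil, add_zero]
    rw [← PySem.List.sum_map_add_int]
    apply congrArg List.sum
    apply List.map_congr_left
    intro q hq
    simp only [csqD, csqE]
    push_cast
    split_ifs <;> first | omega | ring

-- B-side: a full suffix slice is a drop at the clamped index
theorem slice_from_eq_drop (xs : List Int) (e : Int) :
    PySem.List.slice xs (some e) none = xs.drop (PySem.List.clampIdx xs.length e) := by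
  simp only [PySem.List.slice]
  exact List.take_of_length_le (by simp)

-- the clamped slice index is Python's wrapped index e % n on valid indices
theorem clampIdx_eq_mod (n : Nat) (e : Int) (h0 : -(n : Int) ≤ e) (h1 : e < (n : Int)) :
    ((PySem.List.clampIdx n e : Nat) : Int) = PySem.Int.mod e (n : Int) := by
  have hn : 0 < n := by omega
  have hm : PySem.Int.mod e (n : Int) = if 0 ≤ e then e else e + n := by
    rw [PySem.Int.mod_eq_emod_of_pos (by omega)]
    split_ifs with h
    · exact Int.emod_eq_of_lt h (by omega)
    · have h2 : (e + (n : Int) * 1) % (n : Int) = e % (n : Int) :=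
        Int.add_mul_emod_self_left e (n : Int) 1
      rw [← h2, mul_one]
      exact Int.emod_eq_of_lt (by omega) (by omega)
  simp only [PySem.List.clampIdx, hm]
  split_ifs <;> push_cast <;> omega

theorem clampIdx_of_ge (n : Nat) (e : Int) (h : (n : Int) ≤ e) :
    PySem.List.clampIdx n e = n := by
  simp only [PySem.List.clampIdx]
  split_ifs <;> omega

-- suffix update res[c:] mapped by f, read at position t
theorem sfxMap_getD (res : List Int) (c : Nat) (hc : c ≤ res.length) (f : Int → Int)
    (t : Nat) (ht : t < res.length) :
    (res.take c ++ (res.drop c).map f).getD t 0 =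
      if c ≤ t then f (res.getD t 0) else res.getD t 0 := by
  by_cases h : t < c
  · rw [List.getD_append _ _ _ _ (by simp [List.length_take]; omega), if_neg (by omega)]
    rw [List.getD_eq_getElem _ _ (by simp [List.length_take]; omega),
      List.getD_eq_getElem _ _ ht, List.getElem_take]
  · rw [List.getD_append_right _ _ _ _ (by simp [List.length_take]; omega), if_pos (by omega)]
    have hlt : t - (res.take c).length < ((res.drop c).map f).length := by
      simp [List.length_take]
      omega
    rw [List.getD_eq_getElem _ _ hlt, List.getElem_map, List.getElem_drop,
      List.getD_eq_getElem _ _ ht]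
    congr 2
    simp [List.length_take]
    omega

theorem length_sfxMap (res : List Int) (c : Nat) (hc : c ≤ res.length) (f : Int → Int) :
    (res.take c ++ (res.drop c).map f).length = res.length := by
  simp [List.length_take]
  omega

theorem getD_altStep (A : Int) (res q : List Int) (hA : (res.length : Int) = A)
    (hg : csqGood A q) (t : Nat) (ht : t < res.length) :
    (altStep res q).getD t 0 = res.getD t 0 + csqE A q t := by
  obtain ⟨h1, h2, h3⟩ := hg
  simp only [altStep, sfxSet, slice_from_eq_drop, csqE]
  set c1 := PySem.List.clampIdx res.length (PySem.List.pyGetD q 0 0 - 1) with hc1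
  have hc1le : c1 ≤ res.length := PySem.List.clampIdx_le _ _
  have hc1m : ((c1 : Nat) : Int) = PySem.Int.mod (PySem.List.pyGetD q 0 0 - 1) A := by
    rw [hc1, ← hA]
    exact clampIdx_eq_mod _ _ (by omega) (by omega)
  set r1 := res.take c1 ++ (res.drop c1).map (fun v => v + PySem.List.pyGetD q 2 0) with hr1
  have hlen1 : r1.length = res.length := by
    rw [hr1]; exact length_sfxMap _ _ hc1le _
  have hget1 : ∀ s : Nat, s < res.length → r1.getD s 0 =
      res.getD s 0 + if c1 ≤ s then PySem.List.pyGetD q 2 0 else 0 := by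
    intro s hs
    rw [hr1, sfxMap_getD _ _ hc1le _ _ hs]
    split_ifs <;> ring
  rw [hlen1]
  set c2 := PySem.List.clampIdx res.length (PySem.List.pyGetD q 1 0) with hc2
  have hc2le : c2 ≤ res.length := PySem.List.clampIdx_le _ _
  rw [sfxMap_getD r1 c2 (by rw [hlen1]; exact hc2le) _ t (by rw [hlen1]; exact ht)]
  by_cases hj : PySem.List.pyGetD q 1 0 < A
  · have hc2m : ((c2 : Nat) : Int) = PySem.Int.mod (PySem.List.pyGetD q 1 0) A := by
      rw [hc2, ← hA]
      exact clampIdx_eq_mod _ _ (by have := h3 hj; omega) (by omega)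
    simp only [hj, true_and]
    split_ifs with ha hb hc hd he <;>
      rw [hget1 t ht] <;> split_ifs <;> first | omega | ring
  · have hc2n : c2 = res.length := by
      rw [hc2]
      exact clampIdx_of_ge _ _ (by omega)
    rw [if_neg (by omega), hget1 t ht]
    simp only [hj, false_and, if_false]
    split_ifs <;> first | omega | ring

theorem length_altStep (res q : List Int) :
    (altStep res q).length = res.length := by
  simp only [altStep, sfxSet, slice_from_eq_drop]
  rw [length_sfxMap _ _ (PySem.List.clampIdx_le _ _) _,
    length_sfxMap _ _ (PySem.List.clampIdx_le _ _) _]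

theorem foldB_length (B : List (List Int)) (res : List Int) :
    (B.foldl altStep res).length = res.length := by
  induction B generalizing res with
  | nil => rfl
  | cons q B ih => simp [List.foldl_cons, ih, length_altStep]

theorem foldB_getD (A : Int) (B : List (List Int)) (res : List Int)
    (hA : (res.length : Int) = A) (hg : ∀ q ∈ B, csqGood A q) (t : Nat)
    (ht : t < res.length) :
    (B.foldl altStep res).getD t 0 =
      res.getD t 0 + (B.map (fun q => csqE A q t)).sum := by
  induction B generalizing res with
  | nil => simp
  | cons q B ih =>
    have h1 := ih (altStep res q) (by rw [length_altStep]; exact hA)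
      (fun r hr => hg r (List.mem_cons_of_mem _ hr)) (by rw [length_altStep]; exact ht)
    simp only [List.foldl_cons] at *
    rw [h1, getD_altStep A res q hA (hg q List.mem_cons_self) t ht]
    simp [add_assoc]

-- ===== VERDICT (by name: the statement is the Claim_ definition above) =====
theorem contSumQuery_spec : Claim_equal_contSumQuery := by
  intro A B _ hPre
  unfold Spec_contSumQuery
  have hg : ∀ q ∈ B, csqGood A q := by
    intro q hq
    obtain ⟨hl, ha, hb, hc⟩ := hPre q hq
    exact ⟨ha, hb, hc⟩
  simp only [contSumQuery, contSumQuery_alt]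
  apply List.ext_getElem
  · rw [pfx_length, fold1_length, foldB_length]
  · intro t h1 h2
    have hreslen0 : (List.replicate A.toNat (0 : Int)).length = A.toNat :=
      List.length_replicate
    have htA : (t : Int) < A := by
      rw [foldB_length, hreslen0] at h2
      omega
    have hA0 : 0 ≤ A := by omega
    obtain ⟨n, rfl⟩ : ∃ n : Nat, A = (n : Int) := ⟨A.toNat, (Int.toNat_of_nonneg hA0).symm⟩
    have hn : ((n : Int)).toNat = n := Int.toNat_natCast n
    have htn : t < n := by exact_mod_cast htA
    have hreslen : (List.replicate ((n : Int)).toNat (0 : Int)).length = n := by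
      rw [List.length_replicate, hn]
    have hres0 : ∀ s : Nat, (List.replicate ((n : Int)).toNat (0 : Int)).getD s 0 = 0 := by
      intro s
      by_cases hsl : s < ((n : Int)).toNat
      · rw [List.getD_eq_getElem _ _ (by simpa using hsl)]
        simp
      · rw [List.getD_eq_default _ _ (by simpa using Nat.le_of_not_lt hsl)]
    -- right-hand side: B's per-query suffix updates
    rw [show ((B.foldl altStep (List.replicate ((n : Int)).toNat 0))[t]'h2)
        = (B.foldl altStep (List.replicate ((n : Int)).toNat 0)).getD t 0 from
      (List.getD_eq_getElem _ _ h2).symm]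
    rw [foldB_getD (n : Int) B _ (by exact_mod_cast hreslen) hg t (by omega),
      hres0, zero_add]
    -- left-hand side: A's prefix sum of the difference array
    set d := B.foldl (csqStep (n : Int)) (List.replicate ((n : Int)).toNat 0) with hd
    have hdlen' : d.length = n := by rw [hd, fold1_length, hreslen]
    rw [show (((PySem.List.pyRange 1 ((n : Nat) : Int) 1).foldl csqPrefStep d)[t]'h1)
        = ((PySem.List.pyRange 1 ((n : Nat) : Int) 1).foldl csqPrefStep d).getD t 0 from
      (List.getD_eq_getElem _ _ h1).symm]
    rw [pfx_getD d n (by omega) t (by omega), if_pos htn]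
    rw [take_sum_range d (t + 1) (by omega)]
    have hmapeq : (List.range (t + 1)).map (fun s => d.getD s 0) =
        (List.range (t + 1)).map
          (fun s : Nat => (B.map (fun q => csqD (n : Int) q (s : Int))).sum) := by
      apply List.map_congr_left
      intro s hs
      rw [hd, fold1_getD (n : Int) B _ (by exact_mod_cast hreslen) hg s, hres0, zero_add]
    rw [hmapeq, sum_map_DE (n : Int) B hg t htA]
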